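-- pv_equiv track=rewrite | github.com/DrSh1ny/AED | ficha2/ficha2_D.py | algoritmo_B
-- ===== SOURCE A (Python) =====
-- def algoritmo_B(lista,valor):
--     comp=len(lista)
--
--     for i in range(comp):
--         soma=0
--         for j in range(i,comp):
--             soma+=lista[j]
--             if(soma==valor):
--                 return i
--
--     return -1
-- ===== SOURCE B (Python) =====
-- def algoritmo_B(lista, valor):
--     # prefix sums: pref[k] = sum of lista[:k]
--     pref = [0]
--     s = 0
--     for x in lista:
--         s += x
--         pref.append(s)
--     # scan starts right-to-left keeping the set of prefix sums strictly after i;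
--     # a subarray starting at i sums to valor iff pref[i] + valor is in that set.
--     seen = set()
--     ans = -1
--     for i in range(len(lista) - 1, -1, -1):
--         seen.add(pref[i + 1])
--         if pref[i] + valor in seen:
--             ans = i
--     return ans
-- ===== Notes on version B (the rewrite author's own statement) =====
-- stated objective: faster
-- what changed: Replaces the quadratic restart-the-sum double loop by one prefix-sum pass plus a right-to-left scan with a hash set of later prefix sums, tracking the smallest start index that works.
import Mathlib
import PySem

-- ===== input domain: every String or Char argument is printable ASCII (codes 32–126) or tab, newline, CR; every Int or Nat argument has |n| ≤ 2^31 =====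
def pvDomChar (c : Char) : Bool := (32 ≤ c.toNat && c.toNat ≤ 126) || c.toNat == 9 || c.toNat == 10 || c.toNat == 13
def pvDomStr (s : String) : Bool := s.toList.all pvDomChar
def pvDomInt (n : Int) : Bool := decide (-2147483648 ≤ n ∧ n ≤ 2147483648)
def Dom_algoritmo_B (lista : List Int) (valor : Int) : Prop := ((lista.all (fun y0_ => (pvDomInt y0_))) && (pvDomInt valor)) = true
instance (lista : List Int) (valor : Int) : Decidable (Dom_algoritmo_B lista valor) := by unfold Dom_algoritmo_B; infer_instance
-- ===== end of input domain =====

-- B replaces A's O(n^2) restart-the-sum double loop by one prefix-sum pass plus a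
-- right-to-left scan with a set of later prefix sums (objective: faster).

-- ===== PORT A =====
-- inner loop 'for j in range(i,comp): soma+=lista[j]; if soma==valor: return i'
-- (indices produced by pyRange are in range, so pyGetD with default 0 is exact)
def pvAinner (lista : List Int) (valor : Int) : List Int → Int → Bool
  | [], _ => false
  | j :: rest, soma =>
    let soma' := soma + PySem.List.pyGetD lista j 0
    if soma' == valor then true else pvAinner lista valor rest soma'

-- outer loop 'for i in range(comp)': first i whose inner loop returns
def pvAouter (lista : List Int) (valor : Int) (comp : Int) : List Int → Int
  | [] => -1
  | i :: rest =>
    if pvAinner lista valor (PySem.List.pyRange i comp 1) 0 then i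
    else pvAouter lista valor comp rest

def algoritmo_B (lista : List Int) (valor : Int) : Int :=
  let comp : Int := (lista.length : Int)
  pvAouter lista valor comp (PySem.List.pyRange 0 comp 1)

-- ===== PORT B =====
-- 'for i in range(len(lista)-1,-1,-1): seen.add(pref[i+1]); if pref[i]+valor in seen: ans = i'
def pvBloop (pref : List Int) (valor : Int) : List Int → PySem.Set Int → Int → Int
  | [], _, ans => ans
  | i :: rest, seen, ans =>
    let seen' := PySem.Set.add seen (PySem.List.pyGetD pref (i + 1) 0)
    let ans' := if PySem.Set.contains seen' (PySem.List.pyGetD pref i 0 + valor) then i else ans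
    pvBloop pref valor rest seen' ans'

def algoritmo_B_alt (lista : List Int) (valor : Int) : Int :=
  -- 'pref=[0]; s=0; for x in lista: s+=x; pref.append(s)'
  let pref := (lista.foldl (fun ps x => (ps.1 ++ [ps.2 + x], ps.2 + x)) (([0] : List Int), (0 : Int))).1
  pvBloop pref valor (PySem.List.pyRange ((lista.length : Int) - 1) (-1) (-1)) PySem.Set.empty (-1)

-- ===== PRECONDITION & SPEC =====
def Spec_algoritmo_B (lista : List Int) (valor : Int) (out : Int) : Prop := out = algoritmo_B_alt lista valor
instance (lista : List Int) (valor : Int) (out : Int) : Decidable (Spec_algoritmo_B lista valor out) := by unfold Spec_algoritmo_B; infer_instance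

-- ===== CLAIM (what is proved, stated in full; the proofs are below) =====
def Claim_equal_algoritmo_B : Prop := ∀ (lista : List Int) (valor : Int), Dom_algoritmo_B lista valor → Spec_algoritmo_B lista valor (algoritmo_B lista valor)

-- ===== LEMMAS AND PROOFS =====

-- mathematical prefix sums: prefixes l = [sum l[:0], sum l[:1], …, sum l[:n]]
def pvPrefixes (lista : List Int) : List Int :=
  (List.range (lista.length + 1)).map (fun k => (lista.take k).sum)

-- A's inner loop over the suffix itself
def pvInnerNat (valor : Int) : List Int → Int → Bool
  | [], _ => false
  | x :: rest, soma =>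
    let s := soma + x
    if s == valor then true else pvInnerNat valor rest s

-- "a subarray starting at i sums to valor"
def pvHit (lista : List Int) (valor : Int) (i : Nat) : Bool :=
  pvInnerNat valor (lista.drop i) 0

-- forward first-hit scan (A's shape) and backward overwrite scan (B's shape)
def pvFwd (h : Nat → Bool) : Nat → Nat → Int
  | 0, _ => -1
  | m + 1, i => if h i then (i : Int) else pvFwd h m (i + 1)

def pvBwd (h : Nat → Bool) : Nat → Int → Int
  | 0, ans => ans
  | m + 1, ans => pvBwd h m (if h m then (m : Int) else ans)

theorem pvAinner_eq_innerNat (lista : List Int) (valor : Int) :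
    ∀ (j : Nat) (soma : Int), j ≤ lista.length →
      pvAinner lista valor (PySem.List.pyRange (j : Int) (lista.length : Int) 1) soma
        = pvInnerNat valor (lista.drop j) soma := by
  intro j
  induction hm : lista.length - j generalizing j with
  | zero =>
    intro soma hj
    have hje : j = lista.length := by omega
    subst hje
    rw [PySem.List.pyRange_one_eq_nil (by omega)]
    simp [pvAinner, pvInnerNat, List.drop_length]
  | succ m ih =>
    intro soma hj
    have hlt : j < lista.length := by omega
    rw [PySem.List.pyRange_one_cons (by exact_mod_cast hlt)]
    have hget : PySem.List.pyGetD lista (j : Int) 0 = lista[j] := by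
      rw [PySem.List.pyGetD_natCast, List.getD_eq_getElem _ _ hlt]
    have hdrop : lista.drop j = lista[j] :: lista.drop (j + 1) :=
      List.drop_eq_getElem_cons hlt
    simp only [pvAinner, hget, hdrop, pvInnerNat]
    split_ifs with hc
    · rfl
    · have hcast : ((j : Int) + 1) = ((j + 1 : Nat) : Int) := by push_cast; ring
      rw [hcast]
      exact ih (j + 1) (by omega) (soma + lista[j]) (by omega)

theorem pvAouter_eq_fwd (lista : List Int) (valor : Int) :
    ∀ (i : Nat), i ≤ lista.length →
      pvAouter lista valor (lista.length : Int) (PySem.List.pyRange (i : Int) (lista.length : Int) 1)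
        = pvFwd (pvHit lista valor) (lista.length - i) i := by
  intro i
  induction hm : lista.length - i generalizing i with
  | zero =>
    intro hi
    rw [PySem.List.pyRange_one_eq_nil (by omega)]
    simp [pvAouter, pvFwd]
  | succ m ih =>
    intro hi
    have hlt : i < lista.length := by omega
    rw [PySem.List.pyRange_one_cons (by exact_mod_cast hlt)]
    simp only [pvAouter]
    rw [pvAinner_eq_innerNat lista valor i 0 (by omega)]
    simp only [pvFwd, pvHit]
    split_ifs with hc
    · rfl
    · have hcast : ((i : Int) + 1) = ((i + 1 : Nat) : Int) := by push_cast; ring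
      rw [hcast]
      exact ih (i + 1) (by omega) (by omega)

theorem pvInnerNat_iff (valor : Int) :
    ∀ (xs : List Int) (soma : Int),
      pvInnerNat valor xs soma = true ↔ ∃ t < xs.length, soma + (xs.take (t + 1)).sum = valor := by
  intro xs
  induction xs with
  | nil => intro soma; simp [pvInnerNat]
  | cons x rest ih =>
    intro soma
    simp only [pvInnerNat]
    by_cases hc : soma + x = valor
    · simp only [beq_iff_eq, hc, if_true, true_iff]
      exact ⟨0, by simp, by simpa using hc⟩
    · rw [if_neg (by simpa using hc), ih]
      constructor
      · rintro ⟨t, ht, hs⟩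
        exact ⟨t + 1, by simpa using ht, by simpa [List.sum_cons, add_assoc] using hs⟩
      · rintro ⟨t, ht, hs⟩
        cases t with
        | zero => exact absurd (by simpa using hs) hc
        | succ t' =>
          exact ⟨t', by simpa using ht, by simpa [List.sum_cons, add_assoc] using hs⟩

theorem pvPrefixes_getD (lista : List Int) (i : Nat) (hi : i ≤ lista.length) :
    PySem.List.pyGetD (pvPrefixes lista) (i : Int) 0 = (lista.take i).sum := by
  have hi' : i < (pvPrefixes lista).length := by simp [pvPrefixes]; omega
  rw [PySem.List.pyGetD_natCast, List.getD_eq_getElem _ _ hi']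
  simp [pvPrefixes]

theorem pvPrefixes_drop (lista : List Int) (i : Nat) :
    (pvPrefixes lista).drop (i + 1)
      = (List.range' (i + 1) (lista.length - i)).map (fun k => (lista.take k).sum) := by
  unfold pvPrefixes
  rw [← List.map_drop, List.range_eq_range', List.drop_range']
  congr 2 <;> omega

theorem pvHit_iff_mem (lista : List Int) (valor : Int) (i : Nat) (hi : i < lista.length) :
    pvHit lista valor i = true
      ↔ (lista.take i).sum + valor ∈ (pvPrefixes lista).drop (i + 1) := by
  rw [pvHit, pvInnerNat_iff, pvPrefixes_drop]
  simp only [List.mem_map, List.mem_range']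
  constructor
  · rintro ⟨t, ht, hs⟩
    rw [List.length_drop] at ht
    refine ⟨i + t + 1, ⟨t, by omega, by omega⟩, ?_⟩
    have h2 : (lista.take (i + (t + 1))).sum
        = (lista.take i).sum + ((lista.drop i).take (t + 1)).sum := by
      rw [List.take_add, List.sum_append]
    rw [show i + t + 1 = i + (t + 1) by ring, h2]
    omega
  · rintro ⟨k, ⟨j, hj, hkj⟩, hs⟩
    refine ⟨k - i - 1, by rw [List.length_drop]; omega, ?_⟩
    have hik : i + (k - i - 1 + 1) = k := by omega
    have h2 : (lista.take k).sum
        = (lista.take i).sum + ((lista.drop i).take (k - i - 1 + 1)).sum := by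
      conv_lhs => rw [← hik]
      rw [List.take_add, List.sum_append]
    rw [h2] at hs
    omega

theorem pvBloop_eq_bwd (lista : List Int) (valor : Int) :
    ∀ (m : Nat) (seen : PySem.Set Int) (ans : Int), m ≤ lista.length →
      (∀ x, x ∈ seen ↔ x ∈ (pvPrefixes lista).drop (m + 1)) →
      pvBloop (pvPrefixes lista) valor (PySem.List.pyRange ((m : Int) - 1) (-1) (-1)) seen ans
        = pvBwd (pvHit lista valor) m ans := by
  intro m
  induction m with
  | zero =>
    intro seen ans _ _
    rw [PySem.List.pyRange_neg_one_eq_nil (by omega)]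
    simp [pvBloop, pvBwd]
  | succ m ih =>
    intro seen ans hm hseen
    have h1 : ((m + 1 : Nat) : Int) - 1 = (m : Nat) := by push_cast; ring
    rw [h1, PySem.List.pyRange_neg_one_cons (by omega)]
    simp only [pvBloop]
    have hgm1 : PySem.List.pyGetD (pvPrefixes lista) ((m : Int) + 1) 0 = (lista.take (m + 1)).sum := by
      have : ((m : Int) + 1) = ((m + 1 : Nat) : Int) := by push_cast; ring
      rw [this, pvPrefixes_getD lista (m + 1) (by omega)]
    have hgm : PySem.List.pyGetD (pvPrefixes lista) (m : Int) 0 = (lista.take m).sum :=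
      pvPrefixes_getD lista m (by omega)
    have hdropm : (pvPrefixes lista).drop (m + 1)
        = (lista.take (m + 1)).sum :: (pvPrefixes lista).drop (m + 2) := by
      have hlen : m + 1 < (pvPrefixes lista).length := by simp [pvPrefixes]; omega
      rw [List.drop_eq_getElem_cons hlen]
      congr 1
      simp [pvPrefixes]
    have hseen' : ∀ x, x ∈ PySem.Set.add seen (PySem.List.pyGetD (pvPrefixes lista) ((m : Int) + 1) 0)
        ↔ x ∈ (pvPrefixes lista).drop (m + 1) := by
      intro x
      rw [PySem.Set.mem_add, hgm1, hdropm]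
      simp only [List.mem_cons]
      rw [hseen x]
      tauto
    have hcond : PySem.Set.contains (PySem.Set.add seen (PySem.List.pyGetD (pvPrefixes lista) ((m : Int) + 1) 0))
          (PySem.List.pyGetD (pvPrefixes lista) (m : Int) 0 + valor)
        = pvHit lista valor m := by
      cases hb : pvHit lista valor m
      · -- false: not a member
        rw [← Bool.not_eq_true]
        intro hcontr
        rw [PySem.Set.contains_iff] at hcontr
        rw [hseen' _, hgm] at hcontr
        rw [← pvHit_iff_mem lista valor m (by omega)] at hcontr
        rw [hb] at hcontr
        exact Bool.false_ne_true hcontr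
      · rw [PySem.Set.contains_iff, hseen' _, hgm, ← pvHit_iff_mem lista valor m (by omega)]
        exact hb
    rw [hcond, ih _ _ (by omega) hseen']
    rfl

theorem pvPref_build (lista : List Int) :
    ∀ (acc : List Int) (s : Int),
      lista.foldl (fun ps x => (ps.1 ++ [ps.2 + x], ps.2 + x)) ((acc : List Int), s)
        = (acc ++ (List.range lista.length).map (fun k => s + (lista.take (k + 1)).sum), s + lista.sum) := by
  induction lista with
  | nil => intro acc s; simp
  | cons x rest ih =>
    intro acc s
    simp only [List.foldl_cons]
    rw [ih (acc ++ [s + x]) (s + x)]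
    simp only [Prod.mk.injEq]
    refine ⟨?_, by simp [List.sum_cons]; ring⟩
    rw [List.append_assoc]
    congr 1
    rw [List.singleton_append, List.length_cons, List.range_succ_eq_map]
    simp only [List.map_cons, List.map_map]
    refine congrArg₂ _ (by simp) ?_
    congr 1
    funext k
    simp only [Function.comp_apply, List.take_succ_cons, List.sum_cons]
    ring

theorem pvPref_eq_prefixes (lista : List Int) :
    (lista.foldl (fun ps x => (ps.1 ++ [ps.2 + x], ps.2 + x)) (([0] : List Int), (0 : Int))).1
      = pvPrefixes lista := by
  rw [pvPref_build lista [0] 0]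
  unfold pvPrefixes
  rw [List.range_succ_eq_map]
  simp only [List.map_cons, List.map_map]
  simp [Function.comp]

theorem pvBwd_eq_find? (h : Nat → Bool) :
    ∀ (m : Nat) (ans : Int),
      pvBwd h m ans = ((List.range m).find? h).elim ans (fun i => (i : Int)) := by
  intro m
  induction m with
  | zero => intro ans; simp [pvBwd]
  | succ m ih =>
    intro ans
    rw [List.range_succ, List.find?_append]
    simp only [pvBwd, ih]
    rcases hf : (List.range m).find? h with _ | i
    · rw [Option.none_or]
      cases hb : h m <;> simp [List.find?, hb]
    · rw [Option.some_or]
      simp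

theorem pvFwd_eq_find? (h : Nat → Bool) :
    ∀ (m : Nat) (i : Nat),
      pvFwd h m i = (((List.range m).map (· + i)).find? h).elim (-1) (fun j => (j : Int)) := by
  intro m
  induction m with
  | zero => intro i; simp [pvFwd]
  | succ m ih =>
    intro i
    have hsplit : (List.range (m + 1)).map (· + i) = i :: (List.range m).map (· + (i + 1)) := by
      rw [List.range_succ_eq_map]
      simp only [List.map_cons, List.map_map]
      refine congrArg₂ _ (by simp) ?_
      congr 1
      funext k
      simp only [Function.comp_apply]
      omega
    rw [hsplit]
    simp only [pvFwd]
    cases hb : h i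
    · simp only [List.find?_cons, hb, Bool.false_eq_true, if_false]
      rw [ih (i + 1)]
    · simp [hb]

-- ===== VERDICT (by name: the statement is the Claim_ definition above) =====
theorem algoritmo_B_spec : Claim_equal_algoritmo_B := by
  intro lista valor _hdom
  unfold Spec_algoritmo_B
  show algoritmo_B lista valor = algoritmo_B_alt lista valor
  unfold algoritmo_B algoritmo_B_alt
  rw [pvPref_eq_prefixes]
  have hA : pvAouter lista valor (lista.length : Int)
        (PySem.List.pyRange (0 : Int) (lista.length : Int) 1)
      = pvFwd (pvHit lista valor) lista.length 0 := by
    have := pvAouter_eq_fwd lista valor 0 (by omega)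
    simpa using this
  have hB : pvBloop (pvPrefixes lista) valor
        (PySem.List.pyRange ((lista.length : Int) - 1) (-1) (-1)) PySem.Set.empty (-1)
      = pvBwd (pvHit lista valor) lista.length (-1) := by
    apply pvBloop_eq_bwd lista valor lista.length PySem.Set.empty (-1) (by omega)
    intro x
    have hd : (pvPrefixes lista).drop (lista.length + 1) = [] := by
      apply List.drop_eq_nil_of_le
      simp [pvPrefixes]
    rw [hd]
    simp [PySem.Set.empty]
  rw [hA, hB, pvBwd_eq_find?, pvFwd_eq_find?]
  have : (List.range lista.length).map (· + 0) = List.range lista.length := by simp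
  rw [this]
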